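-- pv_equiv track=rewrite | github.com/gamekubz12/python_freewill_testing | 3_number_to_thai/main.py | number_to_thai
-- ===== SOURCE A (Python) =====
-- def number_to_thai(number):
--     if int(number) < 0:
--         # return invalid value
--
--         return "number can not less than 0"
--
--     elif int(number) == 0:
--         return "ศูนย์"
--
--     elif int(number) > 10000000:
--         return "number can not more than 10,000,000"
--
--     thai_number_list = {
--         "0": "",
--         "1": "หนึ่ง",
--         "2": "สอง",
--         "3": "สาม",
--         "4": "สี่",
--         "5": "ห้า",
--         "6": "หก",
--         "7": "เจ็ด",
--         "8": "แปด",
--         "9": "เก้า"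
--     }
--     thai_point_list = [
--         "สิบ",
--         "ร้อย",
--         "พัน",
--         "หมื่น",
--         "แสน",
--         "ล้าน",
--     ]
--     format_num = str(number)
--     splited_num = list(format_num)
--     len_of_splited_num = len(splited_num)
--
--     thai_number = thai_number_list["0"]
--     for i, n in enumerate(splited_num):
--         row = i + 1
--         len_of_point = len(splited_num[row:len_of_splited_num])
--
--         if row > 1 and len_of_splited_num == row and int(n) == 1:
--             thai_number += "เอ็ด"
--             continue
--
--         if row + 1 == len_of_splited_num:
--             if int(n) == 2:
--                 thai_number += "ยี่"
--
--             elif int(n) != 1: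
--                 thai_number += thai_number_list[n]
--         else:
--             thai_number += thai_number_list[n]
--
--         if int(n) > 0 and len_of_splited_num > 1 and len_of_point > 0:
--             if len_of_splited_num <= 7:
--                 thai_number += thai_point_list[len_of_point - 1]
--
--             else:
--                 # [10] [000000] len 8 - (6 + 2) = index 0
--                 # [100] [000000] len 9 - (6 + 2) = index 1
--                 thai_number += thai_point_list[len_of_splited_num - 6 - 2] + thai_point_list[-1]
--
--     return thai_number
-- ===== SOURCE B (Python) =====
-- def number_to_thai(number):
--     if number < 0:
--         return "number can not less than 0"
--     if number == 0:
--         return "ศูนย์"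
--     if number > 10000000:
--         return "number can not more than 10,000,000"
--
--     names = {
--         "0": "",
--         "1": "หนึ่ง",
--         "2": "สอง",
--         "3": "สาม",
--         "4": "สี่",
--         "5": "ห้า",
--         "6": "หก",
--         "7": "เจ็ด",
--         "8": "แปด",
--         "9": "เก้า",
--     }
--     units = ["", "สิบ", "ร้อย", "พัน", "หมื่น", "แสน"]
--
--     def group(s, final):
--         # convert one block of up to 6 digit characters; `final` marks the block
--         # holding the units digit of a multi-digit number (enables the เอ็ด rule)
--         out = []
--         k = len(s)
--         for idx, ch in enumerate(s):
--             d = int(ch)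
--             pos = k - 1 - idx  # power of ten inside the block
--             if d == 0:
--                 continue
--             if pos == 0 and d == 1 and final:
--                 out.append("เอ็ด")
--             elif pos == 1 and d == 1:
--                 out.append("สิบ")
--             elif pos == 1 and d == 2:
--                 out.append("ยี่สิบ")
--             else:
--                 out.append(names[ch] + units[pos])
--         return "".join(out)
--
--     s = str(number)
--     if len(s) <= 6:
--         return group(s, len(s) > 1)
--     high, low = s[:-6], s[-6:]
--     text = group(high, False)
--     if text:
--         text += "ล้าน"
--     return text + group(low, True)
-- ===== Notes on version B (the rewrite author's own statement) =====
-- stated objective: alternative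
-- what changed: Replaces A's single flat enumerate loop with global length/row index arithmetic (plus its special >7-digit concatenation branch) by a split of the digit string at the million boundary and one reusable block converter that works with block-local digit positions and joins collected parts.
-- intended difference: On the single input 10000000 A returns 'หนึ่งสิบล้าน' (its branch for numbers of more than seven digits still emits the digit name หนึ่ง before สิบล้าน), while B returns 'สิบล้าน', the correct Thai numeral for ten million. — e.g. on number_to_thai(10000000): A returns "หนึ่งสิบล้าน", B returns "สิบล้าน"
import Mathlib
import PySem

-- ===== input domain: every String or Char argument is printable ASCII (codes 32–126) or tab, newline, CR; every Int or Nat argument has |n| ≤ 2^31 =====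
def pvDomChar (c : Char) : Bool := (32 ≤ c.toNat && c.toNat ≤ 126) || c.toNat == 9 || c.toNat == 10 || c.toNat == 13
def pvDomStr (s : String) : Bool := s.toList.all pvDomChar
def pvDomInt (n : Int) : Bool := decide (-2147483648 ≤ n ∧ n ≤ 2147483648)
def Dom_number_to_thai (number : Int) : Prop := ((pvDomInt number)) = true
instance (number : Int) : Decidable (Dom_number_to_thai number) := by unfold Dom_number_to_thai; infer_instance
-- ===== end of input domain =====

-- B converts via a split at the million boundary plus one block converter with block-local
-- positions, instead of A's flat enumerate loop with global index arithmetic; on the single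
-- input 10000000 B returns the intended Thai numeral (see D_ below).

-- ===== PORT A =====
-- int(<one-digit string>); every char fed to it comes from str(number) of a nonnegative int, so int() never raises
def pvDigit (c : Char) : Int := (PySem.Int.ofChars? [c]).getD 0

-- the digit-name dict both Python files carry literally
def pvThaiNames : PySem.Dict String String := PySem.Dict.ofList
  [("0", ""), ("1", "หนึ่ง"), ("2", "สอง"), ("3", "สาม"), ("4", "สี่"), ("5", "ห้า"),
   ("6", "หก"), ("7", "เจ็ด"), ("8", "แปด"), ("9", "เก้า")]

-- thai_number_list[n] / names[ch]: the key is always a digit of str(number), so the lookup never misses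
def pvName (c : Char) : List Char := ((pvThaiNames.get? (String.ofList [c])).getD "").toList

def pvThaiPoints : List String := ["สิบ", "ร้อย", "พัน", "หมื่น", "แสน", "ล้าน"]

-- thai_point_list[i]: in A the index is always in range (pyGet? also covers the [-1] wraparound)
def pvPoint (i : Int) : List Char := ((PySem.List.pyGet? pvThaiPoints i).getD "").toList

def number_to_thai (number : Int) : String :=
  if number < 0 then "number can not less than 0"
  else if number = 0 then "ศูนย์"
  else if number > 10000000 then "number can not more than 10,000,000"
  else
    let splited : List Char := PySem.Int.toChars number
    let len : Int := (splited.length : Int)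
    let thai0 : List Char := ((pvThaiNames.get? "0").getD "").toList
    let thai : List Char :=
      (PySem.List.enumerate splited 0).foldl (fun acc p =>
        let row : Int := p.1 + 1
        let lenPoint : Int := ((PySem.List.slice splited (some row) (some len)).length : Int)
        if 1 < row ∧ len = row ∧ pvDigit p.2 = 1 then acc ++ "เอ็ด".toList
        else
          let acc :=
            if row + 1 = len then
              (if pvDigit p.2 = 2 then acc ++ "ยี่".toList
               else if pvDigit p.2 ≠ 1 then acc ++ pvName p.2 else acc)
            else acc ++ pvName p.2
          if 0 < pvDigit p.2 ∧ 1 < len ∧ 0 < lenPoint then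
            (if len ≤ 7 then acc ++ pvPoint (lenPoint - 1)
             else acc ++ (pvPoint (len - 6 - 2) ++ pvPoint (-1)))
          else acc) thai0
    String.ofList thai

-- ===== PORT B =====
def pvUnits : List String := ["", "สิบ", "ร้อย", "พัน", "หมื่น", "แสน"]

-- units[pos]: pos ranges over 0..5 inside a block of at most six digits, always in range
def pvUnit (i : Int) : List Char := ((PySem.List.pyGet? pvUnits i).getD "").toList

def pvGroup (s : List Char) (final : Bool) : List Char :=
  let k : Int := (s.length : Int)
  ((PySem.List.enumerate s 0).foldl (fun out p =>
      let d := pvDigit p.2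
      let pos : Int := k - 1 - p.1
      if d = 0 then out
      else if pos = 0 ∧ d = 1 ∧ final = true then out ++ ["เอ็ด".toList]
      else if pos = 1 ∧ d = 1 then out ++ ["สิบ".toList]
      else if pos = 1 ∧ d = 2 then out ++ ["ยี่สิบ".toList]
      else out ++ [pvName p.2 ++ pvUnit pos])
    ([] : List (List Char))).flatten

def number_to_thai_alt (number : Int) : String :=
  if number < 0 then "number can not less than 0"
  else if number = 0 then "ศูนย์"
  else if number > 10000000 then "number can not more than 10,000,000"
  else
    let s : List Char := PySem.Int.toChars number
    if (s.length : Int) ≤ 6 then String.ofList (pvGroup s (decide (1 < (s.length : Int))))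
    else
      let high := PySem.List.slice s none (some (-6))
      let low := PySem.List.slice s (some (-6)) none
      let t0 := pvGroup high false
      let text := if t0 ≠ [] then t0 ++ "ล้าน".toList else t0
      String.ofList (text ++ pvGroup low true)

-- ===== PRECONDITION & SPEC =====
-- On the single input 10000000 A returns "หนึ่งสิบล้าน" (its branch for numbers of more than seven digits still emits the
-- digit name หนึ่ง before สิบล้าน), while B returns "สิบล้าน", the correct Thai numeral for
-- ten million.
def D_number_to_thai (number : Int) : Prop := number = 10000000
instance (number : Int) : Decidable (D_number_to_thai number) := by
  unfold D_number_to_thai; infer_instance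

def Spec_number_to_thai (number : Int) (out : String) : Prop :=
  ¬ D_number_to_thai number → out = number_to_thai_alt number
instance (number : Int) (out : String) : Decidable (Spec_number_to_thai number out) := by
  unfold Spec_number_to_thai; infer_instance

def pvDiffWitness_number_to_thai : Int := 10000000
def pvDiffWitnessOut_number_to_thai : String × String := ("หนึ่งสิบล้าน", "สิบล้าน")

-- ===== CLAIM (what is proved, stated in full; the proofs are below) =====
def Claim_unchanged_number_to_thai : Prop :=
  ∀ (number : Int), Dom_number_to_thai number → Spec_number_to_thai number (number_to_thai number)
def Claim_changed_number_to_thai : Prop :=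
  Dom_number_to_thai (pvDiffWitness_number_to_thai) ∧
  D_number_to_thai (pvDiffWitness_number_to_thai) ∧
  number_to_thai (pvDiffWitness_number_to_thai) = pvDiffWitnessOut_number_to_thai.1 ∧
  number_to_thai_alt (pvDiffWitness_number_to_thai) = pvDiffWitnessOut_number_to_thai.2 ∧
  pvDiffWitnessOut_number_to_thai.1 ≠ pvDiffWitnessOut_number_to_thai.2
def Claim_exact_number_to_thai : Prop :=
  ∀ (number : Int), Dom_number_to_thai number → D_number_to_thai number →
    number_to_thai number ≠ number_to_thai_alt number

-- ===== LEMMAS AND PROOFS =====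

def pvDigitsList : List Char := ['0','1','2','3','4','5','6','7','8','9']

theorem pvFacts (c : Char) (hc : c ∈ pvDigitsList) :
    0 ≤ pvDigit c ∧ (pvName c = [] ↔ pvDigit c = 0) := by
  fin_cases hc <;> decide

theorem pvDigitChar_mem (k : Nat) (hk : k < 10) : Nat.digitChar k ∈ pvDigitsList := by
  interval_cases k <;> decide

theorem toDigitsCore_mem (f : Nat) : ∀ (n : Nat) (ds : List Char),
    (∀ c ∈ ds, c ∈ pvDigitsList) → ∀ c ∈ Nat.toDigitsCore 10 f n ds, c ∈ pvDigitsList := by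
  induction f with
  | zero => intro n ds h c hcm; exact h c hcm
  | succ f ih =>
    intro n ds h c hcm
    rw [Nat.toDigitsCore] at hcm
    have hcons : ∀ c ∈ Nat.digitChar (n % 10) :: ds, c ∈ pvDigitsList := by
      intro c hc
      rcases List.mem_cons.1 hc with rfl | hc
      · exact pvDigitChar_mem _ (Nat.mod_lt _ (by norm_num))
      · exact h c hc
    by_cases h0 : n / 10 = 0
    · rw [if_pos h0] at hcm; exact hcons c hcm
    · rw [if_neg h0] at hcm; exact ih _ _ hcons c hcm

theorem toDigitsCore_ne_nil (f : Nat) : ∀ (n : Nat) (ds : List Char),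
    f ≠ 0 ∨ ds ≠ [] → Nat.toDigitsCore 10 f n ds ≠ [] := by
  induction f with
  | zero => intro n ds h; exact h.resolve_left (by simp)
  | succ f ih =>
    intro n ds _
    rw [Nat.toDigitsCore]
    by_cases h0 : n / 10 = 0
    · rw [if_pos h0]; exact List.cons_ne_nil _ _
    · rw [if_neg h0]; exact ih _ _ (Or.inr (List.cons_ne_nil _ _))

-- chunk appended by one iteration of A's loop
def chunkA (sp : List Char) (p : Int × Char) : List Char :=
  if 1 < p.1 + 1 ∧ (sp.length : Int) = p.1 + 1 ∧ pvDigit p.2 = 1 then "เอ็ด".toList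
  else
    (if p.1 + 1 + 1 = (sp.length : Int) then
        (if pvDigit p.2 = 2 then "ยี่".toList
         else if pvDigit p.2 ≠ 1 then pvName p.2 else [])
      else pvName p.2) ++
    (if 0 < pvDigit p.2 ∧ 1 < (sp.length : Int) ∧
        0 < ((PySem.List.slice sp (some (p.1 + 1)) (some (sp.length : Int))).length : Int) then
        (if (sp.length : Int) ≤ 7 then
            pvPoint (((PySem.List.slice sp (some (p.1 + 1)) (some (sp.length : Int))).length : Int) - 1)
         else pvPoint ((sp.length : Int) - 6 - 2) ++ pvPoint (-1))
      else [])

-- chunk contributed by one iteration of B's block loop (already joined)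
def chunkB (k : Int) (final : Bool) (p : Int × Char) : List Char :=
  if pvDigit p.2 = 0 then []
  else if k - 1 - p.1 = 0 ∧ pvDigit p.2 = 1 ∧ final = true then "เอ็ด".toList
  else if k - 1 - p.1 = 1 ∧ pvDigit p.2 = 1 then "สิบ".toList
  else if k - 1 - p.1 = 1 ∧ pvDigit p.2 = 2 then "ยี่สิบ".toList
  else pvName p.2 ++ pvUnit (k - 1 - p.1)

theorem number_to_thai_eq_flatMap (number : Int) (h0 : ¬ number < 0) (h1 : ¬ number = 0)
    (h2 : ¬ number > 10000000) :
    number_to_thai number =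
      String.ofList ((PySem.List.enumerate (PySem.Int.toChars number) 0).flatMap
        (chunkA (PySem.Int.toChars number))) := by
  unfold number_to_thai
  rw [if_neg h0, if_neg h1, if_neg h2]
  dsimp only
  have hfun : (fun (acc : List Char) (p : Int × Char) =>
      let row : Int := p.1 + 1
      let lenPoint : Int := ((PySem.List.slice (PySem.Int.toChars number) (some row)
        (some ((PySem.Int.toChars number).length : Int))).length : Int)
      if 1 < row ∧ ((PySem.Int.toChars number).length : Int) = row ∧ pvDigit p.2 = 1 then
        acc ++ "เอ็ด".toList
      else
        let acc :=
          if row + 1 = ((PySem.Int.toChars number).length : Int) then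
            (if pvDigit p.2 = 2 then acc ++ "ยี่".toList
             else if pvDigit p.2 ≠ 1 then acc ++ pvName p.2 else acc)
          else acc ++ pvName p.2
        if 0 < pvDigit p.2 ∧ 1 < ((PySem.Int.toChars number).length : Int) ∧ 0 < lenPoint then
          (if ((PySem.Int.toChars number).length : Int) ≤ 7 then
              acc ++ pvPoint (lenPoint - 1)
           else acc ++ (pvPoint (((PySem.Int.toChars number).length : Int) - 6 - 2) ++ pvPoint (-1)))
        else acc) =
      fun acc p => acc ++ chunkA (PySem.Int.toChars number) p := by
    funext acc p
    simp only [chunkA]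
    split_ifs <;> simp [List.append_assoc]
  rw [hfun, PySem.List.foldl_append_eq_flatMap]
  rfl

-- generic: flatten after flatMap flattens pointwise (nothing in the library closes it)
theorem flatten_flatMap {α β : Type} (g : α → List (List β)) (l : List α) :
    (l.flatMap g).flatten = l.flatMap (fun a => (g a).flatten) := by
  induction l <;> simp [*]

theorem pvGroup_eq_flatMap (s : List Char) (final : Bool) :
    pvGroup s final = (PySem.List.enumerate s 0).flatMap (chunkB (s.length : Int) final) := by
  unfold pvGroup
  dsimp only
  have hfun : (fun (out : List (List Char)) (p : Int × Char) =>
      let d := pvDigit p.2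
      let pos : Int := (s.length : Int) - 1 - p.1
      if d = 0 then out
      else if pos = 0 ∧ d = 1 ∧ final = true then out ++ ["เอ็ด".toList]
      else if pos = 1 ∧ d = 1 then out ++ ["สิบ".toList]
      else if pos = 1 ∧ d = 2 then out ++ ["ยี่สิบ".toList]
      else out ++ [pvName p.2 ++ pvUnit pos]) =
      fun out p => out ++ (if pvDigit p.2 = 0 then [] else [chunkB (s.length : Int) final p]) := by
    funext out p
    simp only [chunkB]
    split_ifs <;> simp
  rw [hfun, PySem.List.foldl_append_eq_flatMap, List.nil_append, flatten_flatMap]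
  apply List.flatMap_congr
  intro p _
  by_cases hd : pvDigit p.2 = 0
  · simp [hd, chunkB]
  · simp [hd]

theorem pvUnit_1 : pvUnit 1 = "สิบ".toList := by decide
theorem pvUnit_0 : pvUnit 0 = [] := by decide
theorem pvPoint_0 : pvPoint 0 = "สิบ".toList := by decide
theorem pvPoint_5 : pvPoint 5 = "ล้าน".toList := by decide

-- interior digit: A writes name-then-unit-word guarded by d > 0, B skips zero digits up front
theorem pieceB_plain (c : Char) (hc : c ∈ pvDigitsList) (U V : List Char) (h : U = V) :
    (if pvDigit c = 0 then [] else pvName c ++ U) =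
      pvName c ++ (if 0 < pvDigit c then V else []) := by
  obtain ⟨h0, hiff⟩ := pvFacts c hc
  by_cases hd : pvDigit c = 0
  · simp [hd, hiff.2 hd]
  · simp [hd, h, lt_of_le_of_ne h0 (Ne.symm hd)]

-- units digit of a multi-digit number (the เอ็ด rule)
theorem pieceB_unit (c : Char) (hc : c ∈ pvDigitsList) :
    (if pvDigit c = 0 then [] else
      if pvDigit c = 1 then "เอ็ด".toList else pvName c ++ pvUnit 0) =
      (if pvDigit c = 1 then "เอ็ด".toList else pvName c) := by
  obtain ⟨_, hiff⟩ := pvFacts c hc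
  by_cases hd : pvDigit c = 0
  · simp [hd, hiff.2 hd]
  · simp [hd, pvUnit_0]

-- tens digit (the สิบ/ยี่ rules)
theorem pieceB_tens (c : Char) (hc : c ∈ pvDigitsList) :
    (if pvDigit c = 0 then [] else
      if pvDigit c = 1 then "สิบ".toList else
      if pvDigit c = 2 then "ยี่สิบ".toList else pvName c ++ pvUnit 1) =
      (if pvDigit c = 2 then "ยี่".toList
       else if pvDigit c = 1 then [] else pvName c) ++
      (if 0 < pvDigit c then pvPoint 0 else []) := by
  obtain ⟨h0, hiff⟩ := pvFacts c hc
  by_cases hd : pvDigit c = 0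
  · simp [hd, hiff.2 hd]
  · have hpos : 0 < pvDigit c := lt_of_le_of_ne h0 (Ne.symm hd)
    by_cases h1 : pvDigit c = 1
    · simp [h1, pvPoint_0]
    · by_cases h2 : pvDigit c = 2
      · simp [h2, pvPoint_0]
      · simp [hd, h1, h2, hpos, pvPoint_0, pvUnit_1]

-- millions digit: B appends "ล้าน" when the high block's text is nonempty, A when the digit is > 0
theorem pieceB_mill (c : Char) (hc : c ∈ pvDigitsList) :
    (if ¬pvDigit c = 0 → pvName c = [] ∧ pvUnit 0 = [] then
        if pvDigit c = 0 then [] else pvName c ++ pvUnit 0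
      else (if pvDigit c = 0 then [] else pvName c ++ pvUnit 0) ++ "ล้าน".toList) =
      pvName c ++ (if 0 < pvDigit c then pvPoint 5 else []) := by
  obtain ⟨h0, hiff⟩ := pvFacts c hc
  by_cases hd : pvDigit c = 0
  · simp [hd, hiff.2 hd]
  · have hpos := lt_of_le_of_ne h0 (Ne.symm hd)
    have hne : pvName c ≠ [] := fun h => hd (hiff.1 h)
    simp [hd, hpos, hne, pvUnit_0, pvPoint_5]

theorem main_eq (sp : List Char) (hmem : ∀ c ∈ sp, c ∈ pvDigitsList) (hne : sp ≠ [])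
    (hlen : sp.length ≤ 7) :
    (PySem.List.enumerate sp 0).flatMap (chunkA sp) =
      (if (sp.length : Int) ≤ 6 then pvGroup sp (decide (1 < (sp.length : Int)))
       else
        (if pvGroup (PySem.List.slice sp none (some (-6))) false ≠ [] then
            pvGroup (PySem.List.slice sp none (some (-6))) false ++ "ล้าน".toList
          else pvGroup (PySem.List.slice sp none (some (-6))) false) ++
          pvGroup (PySem.List.slice sp (some (-6)) none) true) := by
  rcases sp with _ | ⟨a, sp⟩; · exact absurd rfl hne
  rcases sp with _ | ⟨b, sp⟩
  · -- one digit
    have ha := hmem a (by simp)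
    rw [if_pos (by norm_num), pvGroup_eq_flatMap]
    simp only [PySem.List.enumerate_cons, PySem.List.enumerate_nil, List.flatMap_cons,
      List.flatMap_nil, chunkA, chunkB, PySem.List.length_slice, PySem.List.clampIdx]
    norm_num
    obtain ⟨h0, hiff⟩ := pvFacts a ha
    by_cases hd : pvDigit a = 0
    · simp [hd, hiff.2 hd]
    · simp [hd, pvUnit_0]
  rcases sp with _ | ⟨c, sp⟩
  · -- two digits
    have ha := hmem a (by simp)
    have hb := hmem b (by simp)
    rw [if_pos (by norm_num), pvGroup_eq_flatMap]
    simp only [PySem.List.enumerate_cons, PySem.List.enumerate_nil, List.flatMap_cons,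
      List.flatMap_nil, chunkA, chunkB, PySem.List.length_slice, PySem.List.clampIdx]
    norm_num
    rw [pieceB_tens a ha, pieceB_unit b hb]
    simp [List.append_assoc]
  rcases sp with _ | ⟨d3, sp⟩
  · -- three digits
    have ha := hmem a (by simp)
    have hb := hmem b (by simp)
    have hc3 := hmem c (by simp)
    rw [if_pos (by norm_num), pvGroup_eq_flatMap]
    simp only [PySem.List.enumerate_cons, PySem.List.enumerate_nil, List.flatMap_cons,
      List.flatMap_nil, chunkA, chunkB, PySem.List.length_slice, PySem.List.clampIdx]
    norm_num
    rw [pieceB_plain a ha (pvUnit 2) (pvPoint 1) (by decide),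
      pieceB_tens b hb, pieceB_unit c hc3]
    simp [List.append_assoc]
  rcases sp with _ | ⟨d4, sp⟩
  · -- four digits
    have ha := hmem a (by simp)
    have hb := hmem b (by simp)
    have hc3 := hmem c (by simp)
    have hd3 := hmem d3 (by simp)
    rw [if_pos (by norm_num), pvGroup_eq_flatMap]
    simp only [PySem.List.enumerate_cons, PySem.List.enumerate_nil, List.flatMap_cons,
      List.flatMap_nil, chunkA, chunkB, PySem.List.length_slice, PySem.List.clampIdx]
    norm_num
    rw [pieceB_plain a ha (pvUnit 3) (pvPoint 2) (by decide),
      pieceB_plain b hb (pvUnit 2) (pvPoint 1) (by decide),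
      pieceB_tens c hc3, pieceB_unit d3 hd3]
    simp [List.append_assoc]
  rcases sp with _ | ⟨d5, sp⟩
  · -- five digits
    have ha := hmem a (by simp)
    have hb := hmem b (by simp)
    have hc3 := hmem c (by simp)
    have hd3 := hmem d3 (by simp)
    have hd4 := hmem d4 (by simp)
    rw [if_pos (by norm_num), pvGroup_eq_flatMap]
    simp only [PySem.List.enumerate_cons, PySem.List.enumerate_nil, List.flatMap_cons,
      List.flatMap_nil, chunkA, chunkB, PySem.List.length_slice, PySem.List.clampIdx]
    norm_num
    rw [pieceB_plain a ha (pvUnit 4) (pvPoint 3) (by decide),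
      pieceB_plain b hb (pvUnit 3) (pvPoint 2) (by decide),
      pieceB_plain c hc3 (pvUnit 2) (pvPoint 1) (by decide),
      pieceB_tens d3 hd3, pieceB_unit d4 hd4]
    simp [List.append_assoc]
  rcases sp with _ | ⟨d6, sp⟩
  · -- six digits
    have ha := hmem a (by simp)
    have hb := hmem b (by simp)
    have hc3 := hmem c (by simp)
    have hd3 := hmem d3 (by simp)
    have hd4 := hmem d4 (by simp)
    have hd5 := hmem d5 (by simp)
    rw [if_pos (by norm_num), pvGroup_eq_flatMap]
    simp only [PySem.List.enumerate_cons, PySem.List.enumerate_nil, List.flatMap_cons,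
      List.flatMap_nil, chunkA, chunkB, PySem.List.length_slice, PySem.List.clampIdx]
    norm_num
    rw [pieceB_plain a ha (pvUnit 5) (pvPoint 4) (by decide),
      pieceB_plain b hb (pvUnit 4) (pvPoint 3) (by decide),
      pieceB_plain c hc3 (pvUnit 3) (pvPoint 2) (by decide),
      pieceB_plain d3 hd3 (pvUnit 2) (pvPoint 1) (by decide),
      pieceB_tens d4 hd4, pieceB_unit d5 hd5]
    simp [List.append_assoc]
  rcases sp with _ | ⟨d7, sp⟩
  · -- seven digits
    have ha := hmem a (by simp)
    have hb := hmem b (by simp)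
    have hc3 := hmem c (by simp)
    have hd3 := hmem d3 (by simp)
    have hd4 := hmem d4 (by simp)
    have hd5 := hmem d5 (by simp)
    have hd6 := hmem d6 (by simp)
    rw [if_neg (by norm_num)]
    rw [PySem.List.slice_to_neg_ofNat _ 6 (by norm_num),
      PySem.List.slice_from_neg_ofNat _ 6 (by norm_num)]
    norm_num
    rw [pvGroup_eq_flatMap, pvGroup_eq_flatMap]
    simp only [PySem.List.enumerate_cons, PySem.List.enumerate_nil, List.flatMap_cons,
      List.flatMap_nil, chunkA, chunkB, PySem.List.length_slice, PySem.List.clampIdx]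
    norm_num
    rw [pieceB_mill a ha,
      pieceB_plain b hb (pvUnit 5) (pvPoint 4) (by decide),
      pieceB_plain c hc3 (pvUnit 4) (pvPoint 3) (by decide),
      pieceB_plain d3 hd3 (pvUnit 3) (pvPoint 2) (by decide),
      pieceB_plain d4 hd4 (pvUnit 2) (pvPoint 1) (by decide),
      pieceB_tens d5 hd5, pieceB_unit d6 hd6]
    simp [List.append_assoc]
  · simp at hlen; omega

-- ===== VERDICT (by name: the statement is the Claim_ definition above) =====
theorem number_to_thai_spec : Claim_unchanged_number_to_thai := by
  intro number _
  unfold Spec_number_to_thai D_number_to_thai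
  intro hD
  by_cases h0 : number < 0
  · unfold number_to_thai number_to_thai_alt
    rw [if_pos h0, if_pos h0]
  by_cases h1 : number = 0
  · unfold number_to_thai number_to_thai_alt
    rw [if_neg h0, if_neg h0, if_pos h1, if_pos h1]
  by_cases h2 : number > 10000000
  · unfold number_to_thai number_to_thai_alt
    rw [if_neg h0, if_neg h0, if_neg h1, if_neg h1, if_pos h2, if_pos h2]
  · have hform : PySem.Int.toChars number = Nat.toDigitsCore 10 (number.toNat + 1) number.toNat [] := by
      unfold PySem.Int.toChars
      rw [if_neg h0]
      rfl
    have hmem : ∀ c ∈ PySem.Int.toChars number, c ∈ pvDigitsList := by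
      rw [hform]; exact toDigitsCore_mem _ _ _ (by simp)
    have hnil : PySem.Int.toChars number ≠ [] := by
      rw [hform]; exact toDigitsCore_ne_nil _ _ _ (Or.inl (by omega))
    have hlen : (PySem.Int.toChars number).length ≤ 7 := by
      have hlt : number.toNat < 10 ^ 7 := by
        have h9 : number.toNat < 10000000 := by omega
        calc number.toNat < 10000000 := h9
          _ = 10 ^ 7 := by norm_num
      rw [hform]
      exact Nat.toDigits_length 10 number.toNat 7 (by norm_num) hlt
    rw [number_to_thai_eq_flatMap number h0 h1 h2]
    unfold number_to_thai_alt
    rw [if_neg h0, if_neg h1, if_neg h2]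
    dsimp only
    rw [← apply_ite String.ofList]
    exact congrArg String.ofList (main_eq _ hmem hnil hlen)

theorem number_to_thai_changed : Claim_changed_number_to_thai := by
  unfold Claim_changed_number_to_thai; decide

theorem number_to_thai_tight : Claim_exact_number_to_thai := by
  intro number _ hD
  subst hD
  decide
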